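-- pv_equiv track=rewrite | github.com/tuwi-0808374/python-introductie | Opdracht_les_7/studenten.py | get_score_score_student
-- ===== SOURCE A (Python) =====
-- def get_score_score_student(student):
--     score = 0
--     results = student['resultaten'].values()
--     for result in results:
--         if result == "uitmunten":
--             score += 4
--         elif result == "goed":
--             score += 3
--         elif result == "voldoende":
--             score += 2
--         elif result == "onvoldoende":
--             score += 0
--     return score
-- ===== SOURCE B (Python) =====
-- def get_score_score_student(student):
--     # Count each rating once, then take a closed-form weighted sum of the counts.
--     vals = list(student['resultaten'].values())
--     return 4 * vals.count("uitmunten") + 3 * vals.count("goed") + 2 * vals.count("voldoende")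
-- ===== Notes on version B (the rewrite author's own statement) =====
-- stated objective: alternative
-- what changed: Replaces the per-element if/elif accumulator loop with counting the three scoring categories and returning a closed-form weighted sum of the counts.
import Mathlib
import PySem

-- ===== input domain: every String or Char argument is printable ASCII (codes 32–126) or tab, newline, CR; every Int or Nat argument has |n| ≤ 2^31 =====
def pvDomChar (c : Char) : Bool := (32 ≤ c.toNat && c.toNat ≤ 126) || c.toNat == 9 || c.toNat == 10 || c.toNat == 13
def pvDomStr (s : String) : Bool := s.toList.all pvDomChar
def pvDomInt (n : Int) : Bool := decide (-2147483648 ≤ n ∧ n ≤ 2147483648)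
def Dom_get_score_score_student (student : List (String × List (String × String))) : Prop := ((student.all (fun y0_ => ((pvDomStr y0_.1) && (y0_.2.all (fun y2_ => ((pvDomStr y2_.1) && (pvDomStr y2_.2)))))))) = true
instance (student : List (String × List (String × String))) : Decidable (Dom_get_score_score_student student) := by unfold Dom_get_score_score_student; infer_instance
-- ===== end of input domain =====

-- B replaces A's if/elif accumulator loop by counting the three scoring categories
-- and returning a weighted sum of the counts (alternative decomposition, same cost).


-- ===== PORT A =====
def get_score_score_student (student : List (String × List (String × String))) : Int :=
  let results := (PySem.Dict.ofList ((PySem.Dict.ofList student).getD "resultaten" [])).values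
  results.foldl (fun score result =>
    if result == "uitmunten" then score + 4
    else if result == "goed" then score + 3
    else if result == "voldoende" then score + 2
    else if result == "onvoldoende" then score + 0
    else score) 0

-- ===== PORT B =====
def get_score_score_student_alt (student : List (String × List (String × String))) : Int :=
  let vals := (PySem.Dict.ofList ((PySem.Dict.ofList student).getD "resultaten" [])).values
  4 * (vals.count "uitmunten" : Int) + 3 * (vals.count "goed" : Int) + 2 * (vals.count "voldoende" : Int)

-- ===== PRECONDITION & SPEC =====
-- Pre_ excludes only the inputs on which A raises KeyError: no 'resultaten' key.
def Pre_get_score_score_student (student : List (String × List (String × String))) : Prop :=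
  (student.any (fun p => p.1 == "resultaten")) = true
instance (student : List (String × List (String × String))) : Decidable (Pre_get_score_score_student student) := by unfold Pre_get_score_score_student; infer_instance
def pvWitness_get_score_score_student : (List (String × List (String × String))) :=
  [("resultaten", [("wiskunde", "goed"), ("taal", "uitmunten")])]
def Spec_get_score_score_student (student : List (String × List (String × String))) (out : Int) : Prop := out = get_score_score_student_alt student
instance (student : List (String × List (String × String))) (out : Int) : Decidable (Spec_get_score_score_student student out) := by unfold Spec_get_score_score_student; infer_instance

-- ===== CLAIM (what is proved, stated in full; the proofs are below) =====
def Claim_equal_get_score_score_student : Prop := ∀ (student : List (String × List (String × String))), Dom_get_score_score_student student → Pre_get_score_score_student student → Spec_get_score_score_student student (get_score_score_student student)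

-- ===== LEMMAS AND PROOFS =====
theorem score_foldl_eq_counts (l : List String) (a : Int) :
    l.foldl (fun score result =>
      if result == "uitmunten" then score + 4
      else if result == "goed" then score + 3
      else if result == "voldoende" then score + 2
      else if result == "onvoldoende" then score + 0
      else score) a
    = a + 4 * (l.count "uitmunten" : Int) + 3 * (l.count "goed" : Int) + 2 * (l.count "voldoende" : Int) := by
  induction l generalizing a with
  | nil => simp
  | cons x xs ih =>
    simp only [List.foldl_cons, ih, List.count_cons]
    by_cases h1 : x = "uitmunten" <;> by_cases h2 : x = "goed" <;> by_cases h3 : x = "voldoende" <;>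
      by_cases h4 : x = "onvoldoende" <;>
      simp_all <;> push_cast <;> ring

-- ===== VERDICT (by name: the statement is the Claim_ definition above) =====
theorem get_score_score_student_spec : Claim_equal_get_score_score_student := by
  intro student _ _
  unfold Spec_get_score_score_student get_score_score_student get_score_score_student_alt
  simp only [score_foldl_eq_counts]
  ring
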